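-- pv_equiv track=rewrite | github.com/tonygharib/aws-cloud-wan-blueprints-jh | patterns/5-sdwan/cloudformation/lambda/phase3_handler.py | get_ping_targets
-- ===== SOURCE A (Python) =====
-- TUNNELS = [
--     {
--         "router_a": "nv-sdwan",
--         "router_b": "nv-branch1",
--         "vti_a_addr": "169.254.100.1",
--         "vti_b_addr": "169.254.100.2",
--     },
--     {
--         "router_a": "fra-sdwan",
--         "router_b": "fra-branch1",
--         "vti_a_addr": "169.254.100.13",
--         "vti_b_addr": "169.254.100.14",
--     },
-- ]
--
-- def get_ping_targets(router_name):
--     """Return the VTI peer addresses a router should ping for verification.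
--
--     For each tunnel the router participates in, returns the remote VTI address.
--
--     Args:
--         router_name: One of nv-sdwan, nv-branch1, fra-sdwan, fra-branch1
--
--     Returns:
--         list[str]: VTI peer IP addresses to ping
--     """
--     targets = []
--     for tunnel in TUNNELS:
--         if router_name == tunnel["router_a"]:
--             targets.append(tunnel["vti_b_addr"])
--         elif router_name == tunnel["router_b"]:
--             targets.append(tunnel["vti_a_addr"])
--     return targets
-- ===== SOURCE B (Python) =====
-- TUNNELS = [
--     {
--         "router_a": "nv-sdwan",
--         "router_b": "nv-branch1",
--         "vti_a_addr": "169.254.100.1",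
--         "vti_b_addr": "169.254.100.2",
--     },
--     {
--         "router_a": "fra-sdwan",
--         "router_b": "fra-branch1",
--         "vti_a_addr": "169.254.100.13",
--         "vti_b_addr": "169.254.100.14",
--     },
-- ]
--
-- # One-time index: router name -> its ping targets, built once at module load.
-- INDEX = {}
-- for _t in TUNNELS:
--     INDEX.setdefault(_t["router_a"], []).append(_t["vti_b_addr"])
--     if _t["router_b"] != _t["router_a"]:
--         INDEX.setdefault(_t["router_b"], []).append(_t["vti_a_addr"])
--
--
-- def get_ping_targets(router_name):
--     """Return the VTI peer addresses a router should ping for verification."""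
--     return list(INDEX.get(router_name, []))
-- ===== Notes on version B (the rewrite author's own statement) =====
-- stated objective: idiomatic
-- what changed: Replaces the per-call scan over TUNNELS with a dict index from router name to its ping targets built once at module load; each call is a single dict lookup returning a fresh copy.
import Mathlib
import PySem

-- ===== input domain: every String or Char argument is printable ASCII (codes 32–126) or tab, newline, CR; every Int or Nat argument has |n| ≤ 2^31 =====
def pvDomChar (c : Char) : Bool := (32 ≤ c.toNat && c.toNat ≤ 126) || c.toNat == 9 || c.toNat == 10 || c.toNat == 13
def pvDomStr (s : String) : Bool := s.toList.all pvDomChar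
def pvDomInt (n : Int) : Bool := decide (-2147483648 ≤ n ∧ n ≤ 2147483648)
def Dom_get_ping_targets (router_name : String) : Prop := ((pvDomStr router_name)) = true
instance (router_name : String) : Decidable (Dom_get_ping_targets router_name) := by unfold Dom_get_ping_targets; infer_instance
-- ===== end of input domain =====

-- B replaces the per-call scan over TUNNELS with a dict index (router name → targets) built once; idiomatic lookup, same values.

-- ===== PORT A =====
-- TUNNELS as (router_a, router_b, vti_a_addr, vti_b_addr)
def pvTunnels : List (String × String × String × String) :=
  [("nv-sdwan", "nv-branch1", "169.254.100.1", "169.254.100.2"),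
   ("fra-sdwan", "fra-branch1", "169.254.100.13", "169.254.100.14")]

def get_ping_targets (router_name : String) : List String :=
  pvTunnels.foldl (fun targets tunnel =>
    if router_name == tunnel.1 then targets ++ [tunnel.2.2.2]
    else if router_name == tunnel.2.1 then targets ++ [tunnel.2.2.1]
    else targets) []

-- ===== PORT B =====
-- INDEX built once by the module-load loop in Source B
def pvIndex : PySem.Dict String (List String) :=
  pvTunnels.foldl (fun d tunnel =>
    let d := d.modify tunnel.1 [] (· ++ [tunnel.2.2.2])   -- INDEX.setdefault(router_a, []).append(vti_b_addr)
    if tunnel.2.1 != tunnel.1 then d.modify tunnel.2.1 [] (· ++ [tunnel.2.2.1]) else d)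
    PySem.Dict.empty

def get_ping_targets_alt (router_name : String) : List String :=
  pvIndex.getD router_name []   -- list(INDEX.get(router_name, []))

-- ===== PRECONDITION & SPEC =====
def Spec_get_ping_targets (router_name : String) (out : List String) : Prop := out = get_ping_targets_alt router_name
instance (router_name : String) (out : List String) : Decidable (Spec_get_ping_targets router_name out) := by unfold Spec_get_ping_targets; infer_instance

-- ===== CLAIM (what is proved, stated in full; the proofs are below) =====
def Claim_equal_get_ping_targets : Prop := ∀ (router_name : String), Dom_get_ping_targets router_name → Spec_get_ping_targets router_name (get_ping_targets router_name)

-- ===== LEMMAS AND PROOFS =====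

-- ===== VERDICT (by name: the statement is the Claim_ definition above) =====
theorem get_ping_targets_spec : Claim_equal_get_ping_targets := by
  intro rn _
  unfold Spec_get_ping_targets get_ping_targets get_ping_targets_alt pvIndex pvTunnels
  simp only [List.foldl]
  by_cases h1 : rn = "nv-sdwan" <;> by_cases h2 : rn = "nv-branch1" <;>
    by_cases h3 : rn = "fra-sdwan" <;> by_cases h4 : rn = "fra-branch1" <;>
      simp_all [PySem.Dict.getD_modify, PySem.Dict.getD_empty]
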